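-- pv_equiv track=rewrite | github.com/qilei123/OBBDetection | demo/demo_util.py | obbox2hbbox
-- ===== SOURCE A (Python) =====
-- def obbox2hbbox(obbox):
--     minx = float('inf')
--     miny = float('inf')
--     maxx = -1
--     maxy = -1
--
--     for i,xy in enumerate(obbox):
--         if i%2==0:
--             minx = xy if minx>xy else minx
--             maxx = xy if maxx<xy else maxx
--         else:
--             miny = xy if miny>xy else miny
--             maxy = xy if maxy<xy else maxy
--
--     return [int(minx),int(miny),int(maxx-minx),int(maxy-miny)]
-- ===== SOURCE B (Python) =====
-- def obbox2hbbox(obbox):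
--     xs = obbox[0::2]
--     ys = obbox[1::2]
--     minx, miny = min(xs), min(ys)
--     maxx, maxy = max(xs), max(ys)
--     return [minx, miny, maxx - minx, maxy - miny]
-- ===== Notes on version B (the rewrite author's own statement) =====
-- stated objective: idiomatic
-- what changed: Replaces the single index-parity branched loop by slicing the input into x- and y-coordinate lists and applying library min/max; Pre_ excludes inputs of length < 2, on which A raises OverflowError (int(float('inf'))).
-- intended difference: When all x-coordinates (or all y-coordinates) are below -1, A's maxx/maxy initialisation to -1 floors the maximum at -1 and A returns an inflated width/height, while B returns the true max-min extent, which is the intended bounding box. — e.g. on obbox2hbbox([-5, -7, -3, -9]): A returns [-5, -9, 4, 8], B returns [-5, -9, 2, 2]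
import Mathlib
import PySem

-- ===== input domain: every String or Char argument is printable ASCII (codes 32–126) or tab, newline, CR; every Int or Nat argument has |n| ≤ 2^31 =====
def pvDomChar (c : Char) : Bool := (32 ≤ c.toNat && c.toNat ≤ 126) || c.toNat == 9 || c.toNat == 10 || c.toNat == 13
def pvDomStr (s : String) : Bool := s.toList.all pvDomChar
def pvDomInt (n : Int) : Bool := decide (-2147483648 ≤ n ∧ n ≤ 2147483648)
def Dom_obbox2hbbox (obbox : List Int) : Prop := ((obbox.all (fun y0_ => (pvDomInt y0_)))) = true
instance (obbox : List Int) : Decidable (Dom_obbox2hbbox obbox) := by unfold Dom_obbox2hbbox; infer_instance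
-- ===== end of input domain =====

-- B slices the input into x/y coordinate lists and takes library min/max (objective: idiomatic;
-- same cost). A = B is proved outside D_ (A's -1-floored maximum); A raises on length < 2 (Pre_).

-- ===== PORT A =====
-- minx/miny start as float('inf'); modeled as Option Int with none = inf (inf > any int).
def pvInfGt (o : Option Int) (x : Int) : Bool :=
  match o with
  | none => true          -- float('inf') > x for every int x
  | some v => v > x

-- the for-loop over enumerate(obbox): structural recursion over the list carrying the index i
def pvLoopA : List Int → Nat → (Option Int × Option Int × Int × Int) → (Option Int × Option Int × Int × Int)
  | [], _, st => st
  | xy :: rest, i, (minx, miny, maxx, maxy) =>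
    if i % 2 == 0 then
      pvLoopA rest (i + 1)
        ((if pvInfGt minx xy then some xy else minx), miny,
         (if maxx < xy then xy else maxx), maxy)
    else
      pvLoopA rest (i + 1)
        (minx, (if pvInfGt miny xy then some xy else miny),
         maxx, (if maxy < xy then xy else maxy))

def obbox2hbbox (obbox : List Int) : List Int :=
  match pvLoopA obbox 0 (none, none, -1, -1) with
  | (some minx, some miny, maxx, maxy) => [minx, miny, maxx - minx, maxy - miny]
  | _ => []   -- minx or miny still float('inf'): int(inf) raises OverflowError; excluded by Pre_

-- ===== PORT B =====
-- hand port of the step-2 slice obbox[0::2] (exact for a nonnegative start and step 2 on a list)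
def pvEveryOther : List Int → List Int
  | [] => []
  | [x] => [x]
  | x :: _ :: rest => x :: pvEveryOther rest

def obbox2hbbox_alt (obbox : List Int) : List Int :=
  -- xs = obbox[0::2] = pvEveryOther obbox, ys = obbox[1::2] = pvEveryOther obbox.tail
  -- min?/max? are none only on [], where Python's min([])/max([]) raise ValueError (outside Pre_)
  let minx := (PySem.List.min? (pvEveryOther obbox) (fun y => y)).getD 0
  let miny := (PySem.List.min? (pvEveryOther obbox.tail) (fun y => y)).getD 0
  let maxx := (PySem.List.max? (pvEveryOther obbox) (fun y => y)).getD 0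
  let maxy := (PySem.List.max? (pvEveryOther obbox.tail) (fun y => y)).getD 0
  [minx, miny, maxx - minx, maxy - miny]

-- ===== PRECONDITION & SPEC =====
-- Pre_ excludes exactly the inputs of length < 2, on which A raises OverflowError (int(float('inf')))
-- and B raises ValueError (min of an empty sequence).
def Pre_obbox2hbbox (obbox : List Int) : Prop := 2 ≤ obbox.length
instance (obbox : List Int) : Decidable (Pre_obbox2hbbox obbox) := by unfold Pre_obbox2hbbox; infer_instance

def pvWitness_obbox2hbbox : List Int := [3, 7, 10, 2]

-- When all x-coordinates (or all y-coordinates) are below -1, A's maxx/maxy initialisation to -1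
-- floors the maximum at -1 and A returns an inflated width/height, while B returns the true
-- max-min extent, which is the intended bounding box.
def D_obbox2hbbox (obbox : List Int) : Prop :=
  (∀ p ∈ obbox.zipIdx, p.2 % 2 = 0 → p.1 < -1) ∨ (∀ p ∈ obbox.zipIdx, p.2 % 2 = 1 → p.1 < -1)
instance (obbox : List Int) : Decidable (D_obbox2hbbox obbox) := by unfold D_obbox2hbbox; infer_instance

def Spec_obbox2hbbox (obbox : List Int) (out : List Int) : Prop :=
  ¬ D_obbox2hbbox obbox → out = obbox2hbbox_alt obbox
instance (obbox : List Int) (out : List Int) : Decidable (Spec_obbox2hbbox obbox out) := by unfold Spec_obbox2hbbox; infer_instance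

def pvDiffWitness_obbox2hbbox : List Int := [-5, -7, -3, -9]
def pvDiffWitnessOut_obbox2hbbox : (List Int) × (List Int) := ([-5, -9, 4, 8], [-5, -9, 2, 2])

-- ===== CLAIM (what is proved, stated in full; the proofs are below) =====
def Claim_unchanged_obbox2hbbox : Prop := ∀ (obbox : List Int), Dom_obbox2hbbox obbox → Pre_obbox2hbbox obbox → Spec_obbox2hbbox obbox (obbox2hbbox obbox)
def Claim_changed_obbox2hbbox : Prop := Dom_obbox2hbbox (pvDiffWitness_obbox2hbbox) ∧ Pre_obbox2hbbox (pvDiffWitness_obbox2hbbox) ∧ D_obbox2hbbox (pvDiffWitness_obbox2hbbox) ∧ obbox2hbbox (pvDiffWitness_obbox2hbbox) = pvDiffWitnessOut_obbox2hbbox.1 ∧ obbox2hbbox_alt (pvDiffWitness_obbox2hbbox) = pvDiffWitnessOut_obbox2hbbox.2 ∧ pvDiffWitnessOut_obbox2hbbox.1 ≠ pvDiffWitnessOut_obbox2hbbox.2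
def Claim_exact_obbox2hbbox : Prop := ∀ (obbox : List Int), Dom_obbox2hbbox obbox → Pre_obbox2hbbox obbox → D_obbox2hbbox obbox → obbox2hbbox obbox ≠ obbox2hbbox_alt obbox

-- ===== LEMMAS AND PROOFS =====

-- folds describing A's four running extrema
def pvOptMinF (o : Option Int) (l : List Int) : Option Int :=
  l.foldl (fun o x => if pvInfGt o x then some x else o) o
def pvMaxF (m : Int) (l : List Int) : Int :=
  l.foldl (fun m x => if m < x then x else m) m

theorem pvEveryOther_cons (a : Int) (l : List Int) :
    pvEveryOther (a :: l) = a :: pvEveryOther l.tail := by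
  cases l <;> rfl

theorem pvLoopA_cons_even (xy : Int) (rest : List Int) (i : Nat) (minx miny : Option Int)
    (maxx maxy : Int) (hi : i % 2 = 0) :
    pvLoopA (xy :: rest) i (minx, miny, maxx, maxy) =
      pvLoopA rest (i + 1)
        ((if pvInfGt minx xy then some xy else minx), miny,
         (if maxx < xy then xy else maxx), maxy) := by
  simp [pvLoopA, hi]

theorem pvLoopA_cons_odd (xy : Int) (rest : List Int) (i : Nat) (minx miny : Option Int)
    (maxx maxy : Int) (hi : i % 2 ≠ 0) :
    pvLoopA (xy :: rest) i (minx, miny, maxx, maxy) =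
      pvLoopA rest (i + 1)
        (minx, (if pvInfGt miny xy then some xy else miny),
         maxx, (if maxy < xy then xy else maxy)) := by
  simp [pvLoopA, hi]

theorem pvLoopA_spec (l : List Int) :
    ∀ (i : Nat) (minx miny : Option Int) (maxx maxy : Int), i % 2 = 0 →
    pvLoopA l i (minx, miny, maxx, maxy) =
      (pvOptMinF minx (pvEveryOther l), pvOptMinF miny (pvEveryOther l.tail),
       pvMaxF maxx (pvEveryOther l), pvMaxF maxy (pvEveryOther l.tail)) := by
  induction l using pvEveryOther.induct with
  | case1 => intro i minx miny maxx maxy _; simp [pvLoopA, pvEveryOther, pvOptMinF, pvMaxF]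
  | case2 x =>
    intro i minx miny maxx maxy hi
    rw [pvLoopA_cons_even x [] i _ _ _ _ hi]
    simp [pvLoopA, pvEveryOther, pvOptMinF, pvMaxF]
  | case3 x y rest ih =>
    intro i minx miny maxx maxy hi
    have h1 : (i + 1) % 2 ≠ 0 := by omega
    have h2 : (i + 1 + 1) % 2 = 0 := by omega
    rw [pvLoopA_cons_even x (y :: rest) i _ _ _ _ hi,
        pvLoopA_cons_odd y rest (i + 1) _ _ _ _ h1,
        ih (i + 1 + 1) _ _ _ _ h2]
    simp only [pvEveryOther_cons, List.tail_cons]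
    simp [pvOptMinF, pvMaxF]

theorem pvOptMinF_some (m : Int) (l : List Int) :
    pvOptMinF (some m) l = some (l.foldl min m) := by
  induction l generalizing m with
  | nil => rfl
  | cons a t ih =>
    simp only [pvOptMinF, List.foldl_cons] at *
    have : (if pvInfGt (some m) a then some a else some m) = some (min m a) := by
      simp only [pvInfGt, min_def, decide_eq_true_eq]
      split_ifs <;> simp_all
      omega
    rw [this, ih]

theorem pvOptMinF_none_cons (a : Int) (t : List Int) :
    pvOptMinF none (a :: t) = some (t.foldl min a) := by
  simp only [pvOptMinF, List.foldl_cons, pvInfGt, if_pos]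
  exact pvOptMinF_some a t

theorem pvMaxF_eq (m : Int) (l : List Int) : pvMaxF m l = l.foldl max m := by
  have : (fun (m x : Int) => if m < x then x else m) = max := by
    funext m x; rw [max_def]; split_ifs <;> omega
  simp [pvMaxF, this]

theorem pvFoldMax_pull (l : List Int) : ∀ (m x : Int),
    l.foldl max (max m x) = max m (l.foldl max x) := by
  induction l with
  | nil => intro m x; rfl
  | cons a t ih =>
    intro m x
    simp only [List.foldl_cons, max_assoc, ih]

theorem pvZipIdxEven_iff (l : List Int) : ∀ (k : Nat), k % 2 = 0 →
    ((∀ p ∈ l.zipIdx k, p.2 % 2 = 0 → p.1 < -1) ↔ ∀ x ∈ pvEveryOther l, x < -1) := by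
  induction l using pvEveryOther.induct with
  | case1 => intro k _; simp [pvEveryOther]
  | case2 x => intro k hk; simp [pvEveryOther, List.zipIdx, hk]
  | case3 x y rest ih =>
    intro k hk
    have hk1 : (k + 1) % 2 ≠ 0 := by omega
    have hk2 : (k + 2) % 2 = 0 := by omega
    simp only [List.zipIdx_cons, List.mem_cons, pvEveryOther_cons, List.tail_cons]
    rw [show k + 1 + 1 = k + 2 from rfl]
    constructor
    · intro h z hz
      rcases hz with h1 | h1
      · subst h1; exact h (z, k) (Or.inl rfl) hk
      · exact ((ih (k + 2) hk2).mp (fun p hp => h p (Or.inr (Or.inr hp)))) z h1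
    · intro h p hp hpe
      rcases hp with h1 | h1 | h1
      · subst h1; exact h x (Or.inl rfl)
      · subst h1; exact absurd hpe hk1
      · exact (ih (k + 2) hk2).mpr (fun z hz => h z (Or.inr hz)) p h1 hpe

theorem pvZipIdxOdd_iff (l : List Int) : ∀ (k : Nat), k % 2 = 0 →
    ((∀ p ∈ l.zipIdx k, p.2 % 2 = 1 → p.1 < -1) ↔ ∀ x ∈ pvEveryOther l.tail, x < -1) := by
  induction l using pvEveryOther.induct with
  | case1 => intro k _; simp [pvEveryOther]
  | case2 x =>
    intro k hk
    constructor
    · intro _ z hz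
      simp [pvEveryOther] at hz
    · intro _ p hp hpe
      have hpk : p = (x, k) := by simpa [List.zipIdx] using hp
      subst hpk
      simp only at hpe
      omega
  | case3 x y rest ih =>
    intro k hk
    have hk1 : (k + 1) % 2 = 1 := by omega
    have hk0 : k % 2 ≠ 1 := by omega
    have hk2 : (k + 2) % 2 = 0 := by omega
    simp only [List.zipIdx_cons, List.mem_cons, List.tail_cons, pvEveryOther_cons]
    rw [show k + 1 + 1 = k + 2 from rfl]
    constructor
    · intro h z hz
      rcases hz with h1 | h1
      · subst h1; exact h (z, k + 1) (Or.inr (Or.inl rfl)) hk1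
      · exact ((ih (k + 2) hk2).mp (fun p hp => h p (Or.inr (Or.inr hp)))) z h1
    · intro h p hp hpe
      rcases hp with h1 | h1 | h1
      · subst h1; exact absurd hpe hk0
      · subst h1; exact h y (Or.inl rfl)
      · exact (ih (k + 2) hk2).mpr (fun z hz => h z (Or.inr hz)) p h1 hpe

theorem pvMem_le_foldMax (a : Int) (x : Int) (t : List Int) (h : a ∈ x :: t) :
    a ≤ t.foldl max x := by
  induction t generalizing x with
  | nil => simp_all [List.foldl]
  | cons b t' ih =>
    simp only [List.foldl_cons]
    rw [pvFoldMax_pull]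
    rcases List.mem_cons.mp h with h1 | h1
    · exact le_trans (le_of_eq h1) (le_max_left x _)
    · exact le_trans (ih b h1) (le_max_right x _)

-- all elements below -1 ⇒ the running max of the slice is below -1
theorem pvFoldMax_lt (t : List Int) : ∀ (x : Int),
    (∀ a ∈ x :: t, a < -1) → t.foldl max x < -1 := by
  induction t with
  | nil => intro x h; exact h x (List.mem_cons_self)
  | cons b t' ih =>
    intro x h
    simp only [List.foldl_cons]
    apply ih
    intro a ha
    rcases List.mem_cons.mp ha with h1 | h1
    · subst h1
      exact max_lt (h x List.mem_cons_self) (h b (by simp))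
    · exact h a (by simp [h1])

-- A's maxx (seeded at -1) vs B's maxx (true max), given some element ≥ -1
theorem pvMaxF_seed_eq (x : Int) (t : List Int) (h : ∃ a ∈ x :: t, -1 ≤ a) :
    pvMaxF (-1) (x :: t) = t.foldl max x := by
  rw [pvMaxF_eq]
  simp only [List.foldl_cons]
  rw [pvFoldMax_pull]
  obtain ⟨a, ha, hle⟩ := h
  have := pvMem_le_foldMax a x t ha
  omega

theorem pvSliceNonempty (obbox : List Int) (h : 2 ≤ obbox.length) :
    ∃ x xs y ys, pvEveryOther obbox = x :: xs ∧ pvEveryOther obbox.tail = y :: ys := by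
  match obbox, h with
  | a :: b :: rest, _ =>
    exact ⟨a, _, b, _, rfl, by rw [List.tail_cons, pvEveryOther_cons]⟩

-- ===== VERDICT (by name: the statement is the Claim_ definition above) =====
theorem obbox2hbbox_spec : Claim_unchanged_obbox2hbbox := by
  intro obbox _ hPre hD
  obtain ⟨x, xs, y, ys, hx, hy⟩ := pvSliceNonempty obbox hPre
  unfold obbox2hbbox obbox2hbbox_alt
  rw [pvLoopA_spec obbox 0 none none (-1) (-1) rfl, hx, hy,
      pvOptMinF_none_cons, pvOptMinF_none_cons]
  unfold D_obbox2hbbox at hD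
  push Not at hD
  obtain ⟨h1, h2⟩ := hD
  have h1' : ∃ a ∈ pvEveryOther obbox, -1 ≤ a := by
    by_contra hc
    push Not at hc
    obtain ⟨p, hp, hpe, hpge⟩ := h1
    have := (pvZipIdxEven_iff obbox 0 rfl).mpr (fun z hz => by have := hc z hz; omega) p hp hpe
    omega
  have h2' : ∃ b ∈ pvEveryOther obbox.tail, -1 ≤ b := by
    by_contra hc
    push Not at hc
    obtain ⟨p, hp, hpe, hpge⟩ := h2
    have := (pvZipIdxOdd_iff obbox 0 rfl).mpr (fun z hz => by have := hc z hz; omega) p hp hpe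
    omega
  obtain ⟨a, ha, hage⟩ := h1'
  obtain ⟨b, hb, hbge⟩ := h2'
  rw [hx] at ha; rw [hy] at hb
  rw [pvMaxF_seed_eq x xs ⟨a, ha, by omega⟩, pvMaxF_seed_eq y ys ⟨b, hb, by omega⟩]
  rw [PySem.List.min?_id_cons, PySem.List.min?_id_cons,
      PySem.List.max?_id_cons, PySem.List.max?_id_cons]
  rfl

theorem obbox2hbbox_changed : Claim_changed_obbox2hbbox := by
  unfold Claim_changed_obbox2hbbox; decide

theorem obbox2hbbox_tight : Claim_exact_obbox2hbbox := by
  intro obbox _ hPre hD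
  obtain ⟨x, xs, y, ys, hx, hy⟩ := pvSliceNonempty obbox hPre
  unfold obbox2hbbox obbox2hbbox_alt
  rw [pvLoopA_spec obbox 0 none none (-1) (-1) rfl, hx, hy,
      pvOptMinF_none_cons, pvOptMinF_none_cons,
      PySem.List.min?_id_cons, PySem.List.min?_id_cons,
      PySem.List.max?_id_cons, PySem.List.max?_id_cons]
  simp only [Option.getD_some]
  rcases hD with hDx | hDy
  · replace hDx := (pvZipIdxEven_iff obbox 0 rfl).mp hDx
    rw [hx] at hDx
    have hlt : xs.foldl max x < -1 := pvFoldMax_lt xs x hDx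
    have hA : pvMaxF (-1) (x :: xs) = -1 := by
      rw [pvMaxF_eq]
      simp only [List.foldl_cons]
      rw [pvFoldMax_pull]
      omega
    rw [hA]
    intro hEq
    simp only [List.cons.injEq] at hEq
    omega
  · replace hDy := (pvZipIdxOdd_iff obbox 0 rfl).mp hDy
    rw [hy] at hDy
    have hlt : ys.foldl max y < -1 := pvFoldMax_lt ys y hDy
    have hA : pvMaxF (-1) (y :: ys) = -1 := by
      rw [pvMaxF_eq]
      simp only [List.foldl_cons]
      rw [pvFoldMax_pull]
      omega
    rw [hA]
    intro hEq
    simp only [List.cons.injEq] at hEq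
    omega
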